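-- pv_equiv track=rewrite | github.com/Joshua992700/ESEC-Portal | max_unique_value.py | max_unique_value
-- ===== SOURCE A (Python) =====
-- def max_unique_value(arr):
--     n = len(arr)
--     arr.sort(reverse=True)
--     sv = arr[0]
--     res = 0
--
--     for i in range(1, n + 1):
--         res += arr[n - i] * i + sv
--         sv = max(sv, arr[n - i])
--
--     return res-4
-- ===== SOURCE B (Python) =====
-- def max_unique_value(arr):
--     # Same in-place descending sort as A (mutation preserved); after it the
--     # running max in A is always the sorted head, and the index-weighted sum equals the
--     # sum of prefix sums, so one prefix-sum pass suffices.
--     arr.sort(reverse=True)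
--     running = 0
--     total = 0
--     for x in arr:
--         running += x
--         total += running
--     return total + len(arr) * arr[0] - 4
-- ===== Notes on version B (the rewrite author's own statement) =====
-- stated objective: simpler
-- what changed: Replaces A's reverse-indexed weighted loop with a redundant running max by a single forward prefix-sum accumulation, using that after the descending sort the running max is constantly the head and the index-weighted sum equals the sum of prefix sums.
import Mathlib
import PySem

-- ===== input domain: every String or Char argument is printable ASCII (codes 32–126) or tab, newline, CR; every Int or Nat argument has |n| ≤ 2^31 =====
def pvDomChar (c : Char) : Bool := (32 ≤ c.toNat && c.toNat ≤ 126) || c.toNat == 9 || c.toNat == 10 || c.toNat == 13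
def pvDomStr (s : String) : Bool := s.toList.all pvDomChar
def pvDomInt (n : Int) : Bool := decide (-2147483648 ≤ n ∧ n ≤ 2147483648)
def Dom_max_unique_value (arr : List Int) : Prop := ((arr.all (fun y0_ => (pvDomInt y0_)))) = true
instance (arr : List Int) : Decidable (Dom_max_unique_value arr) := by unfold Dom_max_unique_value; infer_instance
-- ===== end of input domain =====

-- B replaces A's reverse-indexed weighted loop + redundant running max by one forward
-- prefix-sum pass (objective: simpler). Both A and B sort the argument in place in
-- Python; the equivalence proved here is about the RETURN value (the mutation is identical).

-- ===== PORT A =====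
def max_unique_value (arr : List Int) : Int :=
  let n : Int := PySem.List.len arr
  let s := PySem.List.sorted arr (fun x => x) true
  let sv := PySem.List.pyGetD s 0 0      -- first element; IndexError on empty input, excluded by Pre_
  let st := (PySem.List.pyRange 1 (n + 1) 1).foldl
    (fun (p : Int × Int) i =>
      (p.1 + PySem.List.pyGetD s (n - i) 0 * i + p.2,
       max p.2 (PySem.List.pyGetD s (n - i) 0)))
    ((0 : Int), sv)
  st.1 - 4

-- ===== PORT B =====
def max_unique_value_alt (arr : List Int) : Int :=
  let s := PySem.List.sorted arr (fun x => x) true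
  let p := s.foldl (fun (p : Int × Int) x => (p.1 + x, p.2 + p.1 + x)) ((0 : Int), (0 : Int))
  p.2 + PySem.List.len s * PySem.List.pyGetD s 0 0 - 4    -- first element; IndexError on empty input, excluded by Pre_

-- ===== PRECONDITION & SPEC =====
-- A raises IndexError on the empty list (arr[0]); excluded.
def Pre_max_unique_value (arr : List Int) : Prop := arr ≠ []
instance (arr : List Int) : Decidable (Pre_max_unique_value arr) := by
  unfold Pre_max_unique_value; infer_instance
def pvWitness_max_unique_value : List Int := ([3, 1, 2] : List Int)

def Spec_max_unique_value (arr : List Int) (out : Int) : Prop := out = max_unique_value_alt arr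
instance (arr : List Int) (out : Int) : Decidable (Spec_max_unique_value arr out) := by
  unfold Spec_max_unique_value; infer_instance

-- ===== CLAIM (what is proved, stated in full; the proofs are below) =====
def Claim_equal_max_unique_value : Prop :=
  ∀ (arr : List Int), Dom_max_unique_value arr → Pre_max_unique_value arr →
    Spec_max_unique_value arr (max_unique_value arr)

-- ===== LEMMAS AND PROOFS =====

/-- Index-weighted sum of a list: `pvW [x0,…,x(k-1)] = Σ xj·(k-j)`. -/
def pvW : List Int → Int
  | [] => 0
  | x :: t => x * ((t.length : Int) + 1) + pvW t

/-- B's prefix-sum fold, shifted start. -/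
theorem pvB_shift (l : List Int) : ∀ (r tt : Int),
    (l.foldl (fun (p : Int × Int) x => (p.1 + x, p.2 + p.1 + x)) (r, tt)).2
      = tt + r * l.length +
        (l.foldl (fun (p : Int × Int) x => (p.1 + x, p.2 + p.1 + x)) (0, 0)).2 := by
  induction l with
  | nil => intro r tt; simp
  | cons x t ih =>
    intro r tt
    simp only [List.foldl_cons]
    rw [ih (r + x) (tt + r + x), ih (0 + x) (0 + 0 + x)]
    simp only [List.length_cons]
    push_cast
    ring

/-- B's fold computes the index-weighted sum. -/
theorem pvB_eq_pvW (l : List Int) :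
    (l.foldl (fun (p : Int × Int) x => (p.1 + x, p.2 + p.1 + x)) (0, 0)).2 = pvW l := by
  induction l with
  | nil => simp [pvW]
  | cons x t ih =>
    simp only [List.foldl_cons]
    rw [pvB_shift t (0 + x) (0 + 0 + x), ih]
    simp [pvW]
    ring

/-- Invariant of A's loop over a list `s` whose first value `a` bounds every element. -/
theorem pvA_inv (s : List Int) (a : Int) (hmax : ∀ y ∈ s, y ≤ a) :
    ∀ (m : Nat), m ≤ s.length →
      ((PySem.List.pyRange 1 ((m : Int) + 1) 1).foldl
        (fun (p : Int × Int) i =>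
          (p.1 + PySem.List.pyGetD s ((s.length : Int) - i) 0 * i + p.2,
           max p.2 (PySem.List.pyGetD s ((s.length : Int) - i) 0)))
        ((0 : Int), a))
      = (pvW (s.drop (s.length - m)) + (m : Int) * a, a) := by
  intro m
  induction m with
  | zero =>
    intro _
    rw [PySem.List.pyRange_one_eq_nil (by norm_num)]
    simp [pvW]
  | succ m ih =>
    intro h
    have hm : m ≤ s.length := Nat.le_of_succ_le h
    have hk : s.length - (m + 1) < s.length := by omega
    have hcast : ((m + 1 : Nat) : Int) + 1 = ((m : Int) + 1) + 1 := by push_cast; ring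
    rw [hcast, PySem.List.pyRange_one_succ_right (by omega), List.foldl_append, ih hm]
    simp only [List.foldl_cons, List.foldl_nil]
    have hidx : (s.length : Int) - ((m : Int) + 1) = ((s.length - (m + 1) : Nat) : Int) := by
      omega
    rw [hidx, PySem.List.pyGetD_natCast, List.getD_eq_getElem s 0 hk]
    have hle : s[s.length - (m + 1)] ≤ a := hmax _ (List.getElem_mem hk)
    have hdrop : s.drop (s.length - (m + 1)) = s[s.length - (m + 1)] :: s.drop (s.length - m) := by
      have h1 : s.length - (m + 1) + 1 = s.length - m := by omega
      rw [List.drop_eq_getElem_cons hk, h1]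
    have hlen : (s.drop (s.length - m)).length = m := by
      rw [List.length_drop]; omega
    rw [max_eq_left hle, hdrop, Prod.mk.injEq]
    refine ⟨?_, rfl⟩
    simp only [pvW, hlen]
    push_cast
    ring

-- ===== VERDICT (by name: the statement is the Claim_ definition above) =====
theorem max_unique_value_spec : Claim_equal_max_unique_value := by
  intro arr _ hpre
  unfold Spec_max_unique_value max_unique_value max_unique_value_alt
  simp only [PySem.List.len_eq]
  set s := PySem.List.sorted arr (fun x => x) true with hs
  have hlen : s.length = arr.length := PySem.List.length_sorted arr (fun x => x) true
  have hsne : s ≠ [] := by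
    intro hnil
    exact hpre ((PySem.List.sorted_eq_nil_iff arr (fun x => x) true).mp hnil)
  obtain ⟨h0, t, hcons⟩ := List.exists_cons_of_ne_nil hsne
  have hcons' : PySem.List.sorted arr (fun x => x) true = h0 :: t := by rw [← hs]; exact hcons
  have ha : PySem.List.pyGetD s 0 0 = h0 := by
    rw [hcons]; simp [PySem.List.pyGetD_zero_cons]
  have hmax : ∀ y ∈ s, y ≤ h0 := by
    intro y hy
    have hy' : y ∈ arr := (PySem.List.mem_sorted arr (fun x => x) true y).mp (hs ▸ hy)
    exact PySem.List.key_head_sorted_rev_ge arr (fun x => x) hcons' y hy'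
  have hinv := pvA_inv s h0 hmax s.length (le_refl _)
  rw [ha, ← hlen, hinv]
  rw [Nat.sub_self, List.drop_zero]
  simp [pvB_eq_pvW]
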